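-- pv_equiv track=rewrite | github.com/arcuru/MyBin | Py_Projects/Euler/179.py | Euler_179
-- ===== SOURCE A (Python) =====
-- def Euler_179(top=10**7):
-- 	''' Returns the number of integers from 1<n<input for which
-- 		n and n+1 have the same number of divisors
-- 	'''
-- 	from math import sqrt
-- 	divlist = [2 for x in range(0,top+2)]
-- 	divlist[1] = 1
-- 	for n in range(2,int(sqrt(top))+1):
-- 		divlist[n*n] += 1
-- 		for s in range(n*n+n,top+1,n):
-- 			divlist[s] += 2
--
-- 	count = 0
-- 	for x in range(1,top+1):
-- 		if divlist[x] == divlist[x+1]: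
-- 			count += 1
-- 	return count
-- ===== SOURCE B (Python) =====
-- def Euler_179(top=10**7):
-- 	''' Returns the number of integers from 1<n<input for which
-- 		n and n+1 have the same number of divisors
-- 	'''
-- 	tau = [0] * (top + 1)
-- 	for d in range(1, top + 1):
-- 		for m in range(d, top + 1, d):
-- 			tau[m] += 1
-- 	count = 0
-- 	for n in range(2, top):
-- 		if tau[n] == tau[n + 1]:
-- 			count += 1
-- 	return count
-- ===== Notes on version B (the rewrite author's own statement) =====
-- stated objective: alternative
-- what changed: B replaces A's sqrt-paired sieve (start every cell at two, add at squares and at paired divisors up to the square root) by a plain harmonic divisor sieve that marks every divisor once on all its multiples, and counts exactly the docstring range of n strictly between one and top, so A's stale end cell disappears.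
-- intended difference: When top itself is prime, A's loop also tests x=top against the never-updated stale cell beyond the sieve (still holding its initial value) and counts it as a match, returning one more than the number of n strictly between one and top with tau(n)=tau(n+1); B returns the intended count from the docstring. — e.g. on Euler_179(2): A returns 1, B returns 0
import Mathlib
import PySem

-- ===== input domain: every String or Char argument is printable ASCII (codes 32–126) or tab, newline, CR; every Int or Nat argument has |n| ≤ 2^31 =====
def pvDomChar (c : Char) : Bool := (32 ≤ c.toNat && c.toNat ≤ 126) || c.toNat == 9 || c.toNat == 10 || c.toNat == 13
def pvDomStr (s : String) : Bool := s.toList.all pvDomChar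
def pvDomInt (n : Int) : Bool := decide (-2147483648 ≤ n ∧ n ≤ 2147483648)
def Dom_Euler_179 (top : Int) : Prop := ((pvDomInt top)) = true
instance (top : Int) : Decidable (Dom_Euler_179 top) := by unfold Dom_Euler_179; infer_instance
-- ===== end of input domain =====

-- B replaces A's sqrt-paired divisor sieve by a plain harmonic divisor sieve and counts only the
-- docstring range of n strictly between one and top; A additionally counts x=top against its stale end cell,
-- so A returns one more than B exactly when top is prime (stated as D_ below); A raises IndexError on negative top (excluded by Pre_).


-- ===== PORT A =====
-- Python "l[i] += v" on a Python list (ported as Array for constant-time updates): exact for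
-- an index i that is nonnegative and within bounds, which holds at every use inside Pre_
-- (Python raises IndexError outside that range; those inputs are excluded by Pre_Euler_179).
def pyAddAt (a : Array Int) (i : Int) (v : Int) : Array Int :=
  a.setIfInBounds i.toNat (a.getD i.toNat 0 + v)

-- int(sqrt(top)): a kernel-transparent integer square root (equal to Nat.sqrt, proved below);
-- Python's float sqrt is exact on the domain |top| ≤ 2^31 (checked against CPython).
def pyIsqrt (n : Nat) : Nat := ((List.range (n + 1)).filter (fun k => k * k ≤ n)).length - 1

-- the sieve array of A: [2]*(top+2), divlist[1] = 1, then the sqrt-paired updates.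
def divlistA (top : Int) : Array Int :=
  let dl := ((PySem.List.pyRange 0 (top + 2)).map (fun _ => (2 : Int))).toArray.setIfInBounds 1 1
  (PySem.List.pyRange 2 ((pyIsqrt top.toNat : Int) + 1)).foldl
    (fun dl n =>
      (PySem.List.pyRange (n * n + n) (top + 1) n).foldl (fun dl s => pyAddAt dl s 2)
        (pyAddAt dl (n * n) 1))
    dl

def Euler_179 (top : Int) : Int :=
  let dl := divlistA top
  (PySem.List.pyRange 1 (top + 1)).foldl
    (fun c x => if dl.getD x.toNat 0 = dl.getD (x + 1).toNat 0 then c + 1 else c)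
    0

-- ===== PORT B =====
-- B's sieve: a zero-initialised table; every d from one to top adds one to all its multiples.
def tauB (top : Int) : Array Int :=
  (PySem.List.pyRange 1 (top + 1)).foldl
    (fun t d => (PySem.List.pyRange d (top + 1) d).foldl (fun t m => pyAddAt t m 1) t)
    (List.replicate (top + 1).toNat 0).toArray

def Euler_179_alt (top : Int) : Int :=
  let t := tauB top
  (PySem.List.pyRange 2 top).foldl
    (fun c n => if t.getD n.toNat 0 = t.getD (n + 1).toNat 0 then c + 1 else c)
    0

-- ===== PRECONDITION & SPEC =====
-- A raises IndexError on negative top (its sieve list is too short for the initial assignment); Pre_ excludes exactly those inputs.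
def Pre_Euler_179 (top : Int) : Prop := 0 ≤ top
instance (top : Int) : Decidable (Pre_Euler_179 top) := by unfold Pre_Euler_179; infer_instance
def pvWitness_Euler_179 : Int := 10

-- When top itself is prime, A's loop also tests x = top against the never-updated stale cell
-- beyond the sieve (still holding its initial value) and counts it as a match, returning one more
-- than the number of n strictly between one and top with tau(n) = tau(n+1); B returns the
-- intended count from the docstring.
def D_Euler_179 (top : Int) : Prop := 2 ≤ top ∧ Nat.Prime top.toNat
instance (top : Int) : Decidable (D_Euler_179 top) := by unfold D_Euler_179; infer_instance

def Spec_Euler_179 (top : Int) (out : Int) : Prop := ¬ D_Euler_179 top → out = Euler_179_alt top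
instance (top : Int) (out : Int) : Decidable (Spec_Euler_179 top out) := by unfold Spec_Euler_179; infer_instance

def pvDiffWitness_Euler_179 : Int := 2
def pvDiffWitnessOut_Euler_179 : Int × Int := (1, 0)

-- ===== CLAIM (what is proved, stated in full; the proofs are below) =====
def Claim_unchanged_Euler_179 : Prop :=
  ∀ (top : Int), Dom_Euler_179 top → Pre_Euler_179 top → Spec_Euler_179 top (Euler_179 top)
def Claim_changed_Euler_179 : Prop :=
  Dom_Euler_179 (pvDiffWitness_Euler_179) ∧ Pre_Euler_179 (pvDiffWitness_Euler_179) ∧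
  D_Euler_179 (pvDiffWitness_Euler_179) ∧
  Euler_179 (pvDiffWitness_Euler_179) = pvDiffWitnessOut_Euler_179.1 ∧
  Euler_179_alt (pvDiffWitness_Euler_179) = pvDiffWitnessOut_Euler_179.2 ∧
  pvDiffWitnessOut_Euler_179.1 ≠ pvDiffWitnessOut_Euler_179.2
def Claim_exact_Euler_179 : Prop :=
  ∀ (top : Int), Dom_Euler_179 top → Pre_Euler_179 top → D_Euler_179 top →
    Euler_179 top ≠ Euler_179_alt top
-- ===== LEMMAS AND PROOFS =====

lemma pyIsqrt_eq (n : Nat) : pyIsqrt n = Nat.sqrt n := by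
  have h1 : (List.range (n + 1)).filter (fun k => k * k ≤ n)
      = (List.range (n + 1)).filter (fun k => k ≤ Nat.sqrt n) := by
    apply List.filter_congr
    intro k _
    simp [Nat.le_sqrt]
  have h2 : ∀ m s : Nat, s ≤ m →
      ((List.range (m + 1)).filter (fun k => k ≤ s)).length = s + 1 := by
    intro m
    induction m with
    | zero => intro s hs; interval_cases s; decide
    | succ m ih =>
      intro s hs
      rcases Nat.lt_or_ge s (m + 1) with h | h
      · rw [List.range_succ, List.filter_append, List.length_append, ih s (by omega)]
        simp [Nat.not_le.mpr h]
      · have hs' : s = m + 1 := by omega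
        subst hs'
        rw [List.filter_eq_self.mpr, List.length_range]
        intro a ha
        simp only [List.mem_range] at ha
        simp; omega
  have hsq : Nat.sqrt n ≤ n := Nat.sqrt_le_self n
  simp [pyIsqrt, h1, h2 n _ hsq]

-- List model of the ports' loops (used only by the proofs; the ports run on Array)
def pyAddAtL (l : List Int) (i : Int) (v : Int) : List Int :=
  l.set i.toNat (l.getD i.toNat 0 + v)

def divlistAL (top : Int) : List Int :=
  let dl := ((PySem.List.pyRange 0 (top + 2)).map (fun _ => (2 : Int))).set 1 1
  (PySem.List.pyRange 2 ((pyIsqrt top.toNat : Int) + 1)).foldl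
    (fun dl n =>
      (PySem.List.pyRange (n * n + n) (top + 1) n).foldl (fun dl s => pyAddAtL dl s 2)
        (pyAddAtL dl (n * n) 1))
    dl

def tauBL (top : Int) : List Int :=
  (PySem.List.pyRange 1 (top + 1)).foldl
    (fun t d => (PySem.List.pyRange d (top + 1) d).foldl (fun t m => pyAddAtL t m 1) t)
    (List.replicate (top + 1).toNat 0)

lemma arr_getD_eq (a : Array Int) (n : Nat) (d : Int) : a.getD n d = a.toList.getD n d := by
  by_cases h : n < a.size
  · rw [Array.getD, dif_pos h, List.getD_eq_getElem?_getD,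
      List.getElem?_eq_getElem (by simpa using h)]
    simp
  · rw [Array.getD, dif_neg h, List.getD_eq_getElem?_getD,
      List.getElem?_eq_none (by simpa using h)]
    rfl

lemma toList_pyAddAt (a : Array Int) (i v : Int) :
    (pyAddAt a i v).toList = pyAddAtL a.toList i v := by
  simp [pyAddAt, pyAddAtL, Array.toList_setIfInBounds, arr_getD_eq]

lemma toList_foldl_pyAddAt (idxs : List Int) (init : Array Int) (v : Int) :
    (idxs.foldl (fun a i => pyAddAt a i v) init).toList
      = idxs.foldl (fun l i => pyAddAtL l i v) init.toList := by
  induction idxs generalizing init with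
  | nil => rfl
  | cons i rest ih => rw [List.foldl_cons, List.foldl_cons, ih, toList_pyAddAt]

lemma toList_foldl_outerA (top : Int) (outer : List Int) (init : Array Int) :
    ((outer.foldl
        (fun a n =>
          (PySem.List.pyRange (n * n + n) (top + 1) n).foldl (fun a s => pyAddAt a s 2)
            (pyAddAt a (n * n) 1))
        init).toList)
      = outer.foldl
          (fun l n =>
            (PySem.List.pyRange (n * n + n) (top + 1) n).foldl (fun l s => pyAddAtL l s 2)
              (pyAddAtL l (n * n) 1))
          init.toList := by
  induction outer generalizing init with
  | nil => rfl
  | cons n rest ih =>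
    rw [List.foldl_cons, List.foldl_cons, ih, toList_foldl_pyAddAt, toList_pyAddAt]

lemma toList_divlistA (top : Int) : (divlistA top).toList = divlistAL top := by
  show ((PySem.List.pyRange 2 ((pyIsqrt top.toNat : Int) + 1)).foldl
      (fun a n =>
        (PySem.List.pyRange (n * n + n) (top + 1) n).foldl (fun a s => pyAddAt a s 2)
          (pyAddAt a (n * n) 1))
      (((PySem.List.pyRange 0 (top + 2)).map (fun _ => (2 : Int))).toArray.setIfInBounds 1 1)).toList
    = (PySem.List.pyRange 2 ((pyIsqrt top.toNat : Int) + 1)).foldl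
      (fun l n =>
        (PySem.List.pyRange (n * n + n) (top + 1) n).foldl (fun l s => pyAddAtL l s 2)
          (pyAddAtL l (n * n) 1))
      (((PySem.List.pyRange 0 (top + 2)).map (fun _ => (2 : Int))).set 1 1)
  rw [toList_foldl_outerA]
  congr 1
  simp [Array.toList_setIfInBounds]

lemma toList_foldl_outerB (top : Int) (outer : List Int) (init : Array Int) :
    ((outer.foldl
        (fun t d => (PySem.List.pyRange d (top + 1) d).foldl (fun t m => pyAddAt t m 1) t)
        init).toList)
      = outer.foldl
          (fun t d => (PySem.List.pyRange d (top + 1) d).foldl (fun t m => pyAddAtL t m 1) t)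
          init.toList := by
  induction outer generalizing init with
  | nil => rfl
  | cons d rest ih =>
    rw [List.foldl_cons, List.foldl_cons, ih, toList_foldl_pyAddAt]

lemma toList_tauB (top : Int) : (tauB top).toList = tauBL top := by
  show ((PySem.List.pyRange 1 (top + 1)).foldl
      (fun t d => (PySem.List.pyRange d (top + 1) d).foldl (fun t m => pyAddAt t m 1) t)
      (List.replicate (top + 1).toNat 0).toArray).toList
    = (PySem.List.pyRange 1 (top + 1)).foldl
      (fun t d => (PySem.List.pyRange d (top + 1) d).foldl (fun t m => pyAddAtL t m 1) t)
      (List.replicate (top + 1).toNat 0)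
  rw [toList_foldl_outerB]

lemma length_pyAddAtL (l : List Int) (i v : Int) : (pyAddAtL l i v).length = l.length := by
  simp [pyAddAtL]

lemma length_foldl_pyAddAtL (idxs : List Int) (init : List Int) (v : Int) :
    (idxs.foldl (fun l i => pyAddAtL l i v) init).length = init.length := by
  induction idxs generalizing init with
  | nil => rfl
  | cons i rest ih => simpa [length_pyAddAtL] using ih (pyAddAtL init i v)

lemma getD_pyAddAtL (l : List Int) (i v : Int) (x : Nat)
    (hi : 0 ≤ i) (hlen : i.toNat < l.length) :
    (pyAddAtL l i v).getD x 0 = l.getD x 0 + if (x : Int) = i then v else 0 := by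
  unfold pyAddAtL
  rcases eq_or_ne x i.toNat with h | h
  · subst h
    rw [List.getD_eq_getElem?_getD, List.getElem?_set_self (by omega), List.getD_eq_getElem?_getD]
    rw [List.getElem?_eq_getElem hlen]
    simp [Int.toNat_of_nonneg hi]
  · rw [List.getD_eq_getElem?_getD, List.getElem?_set_ne (by omega), ← List.getD_eq_getElem?_getD]
    have : (x : Int) ≠ i := by
      intro hx; apply h; omega
    simp [this]

lemma getD_foldl_pyAddAtL (idxs : List Int) (init : List Int) (v : Int) (x : Nat)
    (h : ∀ i ∈ idxs, 0 ≤ i ∧ i.toNat < init.length) :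
    (idxs.foldl (fun l i => pyAddAtL l i v) init).getD x 0
      = init.getD x 0 + v * (idxs.count (x : Int)) := by
  induction idxs generalizing init with
  | nil => simp
  | cons i rest ih =>
    have hi := h i (by simp)
    rw [List.foldl_cons, ih (pyAddAtL init i v)
        (by intro j hj; simpa [pyAddAtL] using h j (List.mem_cons_of_mem _ hj))]
    rw [getD_pyAddAtL _ _ _ _ hi.1 hi.2, List.count_cons]
    rcases eq_or_ne i ((x : Nat) : Int) with he | he
    · simp [he, eq_comm]; ring
    · simp [he, Ne.symm he]

lemma nodup_pyRange_of_pos (a b s : Int) (hs : 0 < s) : (PySem.List.pyRange a b s).Nodup := by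
  unfold PySem.List.pyRange
  rw [if_neg (by omega)]
  refine List.Nodup.map ?_ List.nodup_range
  intro k1 k2 hk
  replace hk : a + s * (k1 : Int) = a + s * (k2 : Int) := hk
  have h12 : s * (k1 : Int) = s * (k2 : Int) := by omega
  have := mul_left_cancel₀ (ne_of_gt hs) h12
  exact_mod_cast this

lemma count_pyRange_of_pos (a b s : Int) (hs : 0 < s) (x : Int) :
    (PySem.List.pyRange a b s).count x
      = if a ≤ x ∧ x < b ∧ s ∣ x - a then 1 else 0 := by
  by_cases hm : x ∈ PySem.List.pyRange a b s
  · rw [if_pos ((PySem.List.mem_pyRange_iff_of_pos hs x).mp hm)]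
    exact List.count_eq_one_of_mem (nodup_pyRange_of_pos a b s hs) hm
  · rw [List.count_eq_zero_of_not_mem hm,
      if_neg (fun hc => hm ((PySem.List.mem_pyRange_iff_of_pos hs x).mpr hc))]

-- the contribution of outer-loop iteration n of A at index x
def contribA (top : Int) (x : Nat) (n : Int) : Int :=
  (if (x : Int) = n * n then 1 else 0)
    + 2 * ((PySem.List.pyRange (n * n + n) (top + 1) n).count (x : Int))

lemma getD_foldl_outerA (top : Int) (outer : List Int) (init : List Int) (x : Nat)
    (hlen : init.length = (top + 2).toNat)
    (h : ∀ n ∈ outer, 2 ≤ n ∧ n * n ≤ top) :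
    ((outer.foldl
        (fun dl n =>
          (PySem.List.pyRange (n * n + n) (top + 1) n).foldl (fun dl s => pyAddAtL dl s 2)
            (pyAddAtL dl (n * n) 1))
        init).getD x 0)
      = init.getD x 0 + (outer.map (contribA top x)).sum := by
  induction outer generalizing init with
  | nil => simp
  | cons n rest ih =>
    have hn := h n (by simp)
    have h0 : (0 : Int) ≤ n * n := mul_self_nonneg n
    have hlen1 : (pyAddAtL init (n * n) 1).length = (top + 2).toNat := by
      rw [length_pyAddAtL, hlen]
    have hmem : ∀ s ∈ PySem.List.pyRange (n * n + n) (top + 1) n,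
        0 ≤ s ∧ s.toNat < (pyAddAtL init (n * n) 1).length := by
      intro s hsm
      have hs := (PySem.List.mem_pyRange_iff_of_pos (by omega : (0 : Int) < n) s).mp hsm
      have h1 := hs.1
      have h2 := hs.2.1
      constructor
      · omega
      · rw [hlen1]; omega
    rw [List.foldl_cons,
      ih _ (by rw [length_foldl_pyAddAtL, hlen1]) (fun m hm => h m (List.mem_cons_of_mem _ hm)),
      getD_foldl_pyAddAtL _ _ _ _ hmem,
      getD_pyAddAtL _ _ _ _ h0 (by rw [hlen]; have := hn.2; omega)]
    simp [contribA]
    ring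

lemma pyRange_one_nil (a b : Int) (h : b ≤ a) : PySem.List.pyRange a b = [] :=
  List.eq_nil_iff_forall_not_mem.mpr fun x hx => by
    have := PySem.List.mem_pyRange_one.mp hx; omega

lemma countP_pyRange_one (a : Nat) : ∀ (b : Nat) (q : Nat → Prop) [DecidablePred q],
    (PySem.List.pyRange a b).countP (fun i => decide (q i.toNat))
      = ((Finset.Ico a b).filter q).card := by
  intro b
  induction b with
  | zero =>
    intro q _
    rw [pyRange_one_nil _ _ (by exact_mod_cast Int.natCast_nonneg a)]
    simp
  | succ b ih =>
    intro q _
    rcases Nat.lt_or_ge b a with h | h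
    · rw [pyRange_one_nil _ _ (by exact_mod_cast h), Finset.Ico_eq_empty (by omega)]
      simp
    · rw [show ((b + 1 : Nat) : Int) = (b : Int) + 1 by push_cast; ring,
        PySem.List.pyRange_one_succ_right (by exact_mod_cast h), List.countP_append,
        ih q, Finset.Ico_add_one_right_eq_Icc, ← Finset.Ico_insert_right h,
        Finset.filter_insert]
      have hb : (b : Nat) ∉ Finset.filter q (Finset.Ico a b) := by simp
      by_cases hq : q b
      · rw [if_pos hq, Finset.card_insert_of_notMem hb]
        simp [hq]
      · rw [if_neg hq]
        simp [hq]

lemma tau_pairing (x R : Nat) (hx : 2 ≤ x) (hR : ∀ n : Nat, n * n ≤ x → n ≤ R) :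
    x.divisors.card
      = 2 + ((Finset.Icc 2 R).filter (fun n => n * n = x)).card
          + 2 * ((Finset.Icc 2 R).filter (fun n => n ∣ x ∧ n * n + n ≤ x)).card := by
  have hx0 : x ≠ 0 := by omega
  set D := x.divisors with hD
  set S1 := D.filter (fun d => d * d < x) with hS1
  set S2 := D.filter (fun d => d * d = x) with hS2
  set S3 := D.filter (fun d => x < d * d) with hS3
  have hdpos : ∀ d ∈ D, 0 < d ∧ d ∣ x := by
    intro d hd
    rw [hD, Nat.mem_divisors] at hd
    exact ⟨Nat.pos_of_dvd_of_pos hd.1 (by omega), hd.1⟩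
  have hsplit : D.card = S1.card + S2.card + S3.card := by
    rw [← Finset.card_filter_add_card_filter_not (s := D) (p := fun d => d * d < x)]
    have h23 : D.filter (fun d => ¬ d * d < x) = S2 ∪ S3 := by
      ext d
      simp only [hS2, hS3, Finset.mem_filter, Finset.mem_union]
      constructor
      · rintro ⟨h1, h2⟩
        rcases Nat.lt_or_ge x (d * d) with h | h
        · exact Or.inr ⟨h1, h⟩
        · exact Or.inl ⟨h1, by omega⟩
      · rintro (⟨h1, h2⟩ | ⟨h1, h2⟩) <;> exact ⟨h1, by omega⟩
    have hdisj : Disjoint S2 S3 := by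
      rw [Finset.disjoint_left]
      intro d h2 h3
      simp only [hS2, hS3, Finset.mem_filter] at h2 h3
      omega
    rw [h23, Finset.card_union_of_disjoint hdisj]
    ring
  have key : ∀ d ∈ S1, (x / d ∈ S3) ∧ x / (x / d) = d := by
    intro d hd
    rw [hS1, Finset.mem_filter] at hd
    obtain ⟨hpos, hdvd⟩ := hdpos d hd.1
    obtain ⟨e, he⟩ := hdvd
    have hepos : 0 < e := by
      rcases Nat.eq_zero_or_pos e with h | h
      · subst h; omega
      · exact h
    have hde : x / d = e := by rw [he, Nat.mul_div_cancel_left _ hpos]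
    have hlt : d < e := by
      by_contra hc
      push_neg at hc
      have : d * e ≤ d * d := Nat.mul_le_mul_left d hc
      omega
    have hxe : x < e * e := by nlinarith
    refine ⟨?_, ?_⟩
    · rw [hS3, Finset.mem_filter, hde, hD, Nat.mem_divisors]
      exact ⟨⟨⟨d, by rw [he, Nat.mul_comm]⟩, hx0⟩, hxe⟩
    · rw [hde, he, Nat.mul_div_cancel _ hepos]
  have key3 : ∀ e ∈ S3, (x / e ∈ S1) ∧ x / (x / e) = e := by
    intro e he'
    rw [hS3, Finset.mem_filter] at he'
    obtain ⟨hepos, hedvd⟩ := hdpos e he'.1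
    obtain ⟨d, hd⟩ := hedvd
    have hdpos' : 0 < d := by
      rcases Nat.eq_zero_or_pos d with h | h
      · subst h; omega
      · exact h
    have hed : x / e = d := by rw [hd, Nat.mul_div_cancel_left _ hepos]
    have hlt : d < e := by
      by_contra hc
      push_neg at hc
      have : e * e ≤ e * d := Nat.mul_le_mul_left e hc
      omega
    have hxd : d * d < x := by nlinarith
    refine ⟨?_, ?_⟩
    · rw [hS1, Finset.mem_filter, hed, hD, Nat.mem_divisors]
      exact ⟨⟨⟨e, by rw [hd, Nat.mul_comm]⟩, hx0⟩, hxd⟩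
    · rw [hed, hd, Nat.mul_div_cancel _ hdpos']
  have hbij : S1.card = S3.card :=
    Finset.card_bij' (fun d _ => x / d) (fun e _ => x / e)
      (fun d hd => (key d hd).1) (fun e he' => (key3 e he').1)
      (fun d hd => (key d hd).2) (fun e he' => (key3 e he').2)
  have hS2eq : S2 = (Finset.Icc 2 R).filter (fun n => n * n = x) := by
    ext n
    rw [hS2, Finset.mem_filter, Finset.mem_filter, Finset.mem_Icc, hD, Nat.mem_divisors]
    constructor
    · rintro ⟨⟨hdvd, _⟩, hsq⟩
      have h2 : 2 ≤ n := by nlinarith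
      exact ⟨⟨h2, hR n (by omega)⟩, hsq⟩
    · rintro ⟨⟨h2, _⟩, hsq⟩
      exact ⟨⟨⟨n, hsq.symm⟩, hx0⟩, hsq⟩
  have h1S1 : 1 ∈ S1 := by
    rw [hS1, Finset.mem_filter, hD, Nat.mem_divisors]
    exact ⟨⟨one_dvd x, hx0⟩, by omega⟩
  have hS1erase : S1.erase 1 = (Finset.Icc 2 R).filter (fun n => n ∣ x ∧ n * n + n ≤ x) := by
    ext d
    rw [Finset.mem_erase, hS1, Finset.mem_filter, Finset.mem_filter, Finset.mem_Icc, hD,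
      Nat.mem_divisors]
    constructor
    · rintro ⟨hne, ⟨hdvd, _⟩, hlt⟩
      have hdpos' : 0 < d := Nat.pos_of_dvd_of_pos hdvd (by omega)
      have h2 : 2 ≤ d := by omega
      obtain ⟨e, he⟩ := hdvd
      have hepos : 0 < e := by
        rcases Nat.eq_zero_or_pos e with h | h
        · subst h; omega
        · exact h
      have hde : d < e := by
        by_contra hc
        push_neg at hc
        have : d * e ≤ d * d := Nat.mul_le_mul_left d hc
        omega
      have : d * d + d ≤ x := by
        have : d * (d + 1) ≤ d * e := Nat.mul_le_mul_left d (by omega)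
        calc d * d + d = d * (d + 1) := by ring
        _ ≤ d * e := this
        _ = x := he.symm
      exact ⟨⟨h2, hR d (by omega)⟩, ⟨e, he⟩, this⟩
    · rintro ⟨⟨h2, _⟩, hdvd, hle⟩
      exact ⟨by omega, ⟨hdvd, hx0⟩, by omega⟩
  have hcard1 : S1.card
      = ((Finset.Icc 2 R).filter (fun n => n ∣ x ∧ n * n + n ≤ x)).card + 1 := by
    rw [← hS1erase, Finset.card_erase_of_mem h1S1]
    have : 0 < S1.card := Finset.card_pos.mpr ⟨1, h1S1⟩
    omega
  rw [hsplit, ← hbij, hS2eq, hcard1]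
  omega

lemma prime_iff_card_divisors (p : Nat) (hp : 2 ≤ p) : p.Prime ↔ p.divisors.card = 2 := by
  constructor
  · intro h
    rw [Nat.Prime.divisors h, Finset.card_insert_of_notMem (by simp; omega),
      Finset.card_singleton]
  · intro h
    rw [Nat.prime_def]
    refine ⟨hp, ?_⟩
    intro m hm
    by_contra hc
    push_neg at hc
    have h1 : (1 : Nat) ∈ p.divisors := Nat.one_mem_divisors.mpr (by omega)
    have hpp : p ∈ p.divisors := Nat.mem_divisors_self p (by omega)
    have hmm : m ∈ p.divisors := Nat.mem_divisors.mpr ⟨hm, by omega⟩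
    have hsub : ({1, m, p} : Finset Nat) ⊆ p.divisors := by
      intro a ha
      simp only [Finset.mem_insert, Finset.mem_singleton] at ha
      rcases ha with rfl | rfl | rfl <;> assumption
    have hm1 : m ≠ 1 := hc.1
    have hmp : m ≠ p := hc.2
    have hcard : ({1, m, p} : Finset Nat).card = 3 := by
      rw [Finset.card_insert_of_notMem (by simp; omega),
        Finset.card_insert_of_notMem (by simp [hmp]), Finset.card_singleton]
    have := Finset.card_le_card hsub
    omega

lemma getD_initA (top : Int) (ht : 0 ≤ top) (x : Nat) :
    (((PySem.List.pyRange 0 (top + 2)).map (fun _ => (2 : Int))).set 1 1).getD x 0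
      = if x < (top + 2).toNat then (if x = 1 then 1 else 2) else 0 := by
  have hcast : top + 2 = (((top + 2).toNat : Nat) : Int) := by omega
  have hN : 2 ≤ (top + 2).toNat := by omega
  rw [List.map_const']
  have hlen : (PySem.List.pyRange 0 (top + 2)).length = (top + 2).toNat := by
    rw [hcast, PySem.List.pyRange_zero_natCast]
    simp
    omega
  rw [hlen]
  rcases eq_or_ne x 1 with hx1 | hx1
  · subst hx1
    rw [List.getD_eq_getElem?_getD, List.getElem?_set_self (by simp; omega)]
    simp
    omega
  · rw [List.getD_eq_getElem?_getD, List.getElem?_set_ne (by omega)]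
    rcases Nat.lt_or_ge x (top + 2).toNat with h | h
    · rw [List.getElem?_eq_getElem (by simpa using h)]
      simp [hx1, h]
    · rw [List.getElem?_eq_none (by simpa using h)]
      simp [hx1]
      omega

lemma divlistAL_getD (top : Int) (ht : 0 ≤ top) (x : Nat) :
    (divlistAL top).getD x 0
      = (if x < (top + 2).toNat then (if x = 1 then 1 else 2) else 0)
        + ((PySem.List.pyRange 2 ((Nat.sqrt top.toNat : Int) + 1)).map (contribA top x)).sum := by
  unfold divlistAL
  rw [pyIsqrt_eq]
  rw [getD_foldl_outerA top _ _ x, getD_initA top ht x]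
  · rw [List.length_set, List.length_map]
    rw [show top + 2 = (((top + 2).toNat : Nat) : Int) from by omega,
      PySem.List.pyRange_zero_natCast]
    simp
    omega
  · intro n hn
    have hmem := PySem.List.mem_pyRange_one.mp hn
    refine ⟨hmem.1, ?_⟩
    set m := n.toNat with hm
    have hmn : n = (m : Int) := (Int.toNat_of_nonneg (by omega)).symm
    have hms : m ≤ Nat.sqrt top.toNat := by omega
    have h1 : m * m ≤ top.toNat := Nat.le_sqrt.mp hms
    have h2 : ((m * m : Nat) : Int) ≤ ((top.toNat : Nat) : Int) := by exact_mod_cast h1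
    have h3 : ((top.toNat : Nat) : Int) = top := Int.toNat_of_nonneg ht
    rw [hmn]
    push_cast at h2 ⊢
    omega

lemma divlistAL_getD_tau (top : Int) (x : Nat) (hx : 2 ≤ x) (hxt : (x : Int) ≤ top) :
    (divlistAL top).getD x 0 = (x.divisors.card : Int) := by
  have ht : 0 ≤ top := by omega
  have htoN : ((top.toNat : Nat) : Int) = top := Int.toNat_of_nonneg ht
  rw [divlistAL_getD top ht x, if_pos (by omega), if_neg (by omega)]
  set R := Nat.sqrt top.toNat with hRdef
  have hRprop : ∀ n : Nat, n * n ≤ x → n ≤ R := by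
    intro n hn
    apply Nat.le_sqrt.mpr
    have : (x : Int) ≤ ((top.toNat : Nat) : Int) := by omega
    have hxN : x ≤ top.toNat := by exact_mod_cast this
    omega
  have hmap : (PySem.List.pyRange 2 ((R : Int) + 1)).map (contribA top x)
      = (PySem.List.pyRange 2 ((R : Int) + 1)).map
          (fun n => (if decide (n.toNat * n.toNat = x) = true then (1 : Int) else 0)
            + 2 * (if decide (n.toNat ∣ x ∧ n.toNat * n.toNat + n.toNat ≤ x) = true
                then (1 : Int) else 0)) := by
    apply List.map_congr_left
    intro n hn
    have h2n : 2 ≤ n := (PySem.List.mem_pyRange_one.mp hn).1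
    set m := n.toNat with hm
    have hmn : n = (m : Int) := (Int.toNat_of_nonneg (by omega)).symm
    unfold contribA
    rw [count_pyRange_of_pos _ _ _ (by omega)]
    have hiff1 : ((x : Int) = n * n) ↔ (decide (m * m = x) = true) := by
      rw [decide_eq_true_eq, hmn, eq_comm]
      constructor
      · intro h; exact_mod_cast h
      · intro h; exact_mod_cast h
    have hdvd_shift : ((m : Int)) ∣ ((m : Int) * (m : Int) + (m : Int)) := ⟨(m : Int) + 1, by ring⟩
    have hiff2 : (n * n + n ≤ (x : Int) ∧ (x : Int) < top + 1 ∧ n ∣ (x : Int) - (n * n + n))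
        ↔ (decide (m ∣ x ∧ m * m + m ≤ x) = true) := by
      rw [decide_eq_true_eq, hmn]
      constructor
      · rintro ⟨h1, _, h3⟩
        have hdx : ((m : Int)) ∣ (x : Int) := by
          have := dvd_add h3 hdvd_shift
          simpa using this
        constructor
        · exact_mod_cast hdx
        · exact_mod_cast h1
      · rintro ⟨hd, hle⟩
        refine ⟨by exact_mod_cast hle, by omega, ?_⟩
        have hdx : ((m : Int)) ∣ (x : Int) := Int.natCast_dvd_natCast.mpr hd
        exact dvd_sub hdx hdvd_shift
    rw [if_congr hiff1 rfl rfl, if_congr hiff2 rfl rfl]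
    push_cast
    ring
  rw [hmap]
  have hsplit : ((PySem.List.pyRange 2 ((R : Int) + 1)).map
      (fun n => (if decide (n.toNat * n.toNat = x) = true then (1 : Int) else 0)
        + 2 * (if decide (n.toNat ∣ x ∧ n.toNat * n.toNat + n.toNat ≤ x) = true
            then (1 : Int) else 0))).sum
      = ((PySem.List.pyRange 2 ((R : Int) + 1)).map
          (fun n => if decide (n.toNat * n.toNat = x) = true then (1 : Int) else 0)).sum
        + 2 * ((PySem.List.pyRange 2 ((R : Int) + 1)).map
          (fun n => if decide (n.toNat ∣ x ∧ n.toNat * n.toNat + n.toNat ≤ x) = true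
              then (1 : Int) else 0)).sum := by
    rw [PySem.List.sum_map_add_int]
    congr 1
    rw [← List.sum_map_mul_left]
  rw [hsplit, PySem.List.sum_map_ite_one_zero, PySem.List.sum_map_ite_one_zero]
  have hlist : PySem.List.pyRange 2 ((R : Int) + 1)
      = PySem.List.pyRange ((2 : Nat) : Int) ((R + 1 : Nat) : Int) := by
    congr 1 <;> push_cast <;> ring
  rw [hlist, countP_pyRange_one 2 (R + 1) (fun n => n * n = x),
    countP_pyRange_one 2 (R + 1) (fun n => n ∣ x ∧ n * n + n ≤ x),
    Finset.Ico_add_one_right_eq_Icc]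
  have h := tau_pairing x R hx hRprop
  omega

lemma divlistAL_getD_one (top : Int) (ht : 1 ≤ top) : (divlistAL top).getD 1 0 = 1 := by
  rw [divlistAL_getD top (by omega) 1, if_pos (by omega), if_pos rfl]
  have : ∀ n ∈ PySem.List.pyRange 2 ((Nat.sqrt top.toNat : Int) + 1), contribA top 1 n = 0 := by
    intro n hn
    have h2n : 2 ≤ n := (PySem.List.mem_pyRange_one.mp hn).1
    unfold contribA
    rw [count_pyRange_of_pos _ _ _ (by omega)]
    split_ifs with h1 h2 h2
    · exfalso; push_cast at h1; nlinarith
    · exfalso; push_cast at h1; nlinarith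
    · exfalso; have := h2.1; push_cast at this; nlinarith
    · norm_num
  rw [List.map_congr_left this]
  simp

lemma divlistAL_getD_top_succ (top : Int) (ht : 1 ≤ top) :
    (divlistAL top).getD (top + 1).toNat 0 = 2 := by
  rw [divlistAL_getD top (by omega) (top + 1).toNat, if_pos (by omega), if_neg (by omega)]
  have htc : (((top + 1).toNat : Nat) : Int) = top + 1 := Int.toNat_of_nonneg (by omega)
  have : ∀ n ∈ PySem.List.pyRange 2 ((Nat.sqrt top.toNat : Int) + 1),
      contribA top (top + 1).toNat n = 0 := by
    intro n hn
    have hmem := PySem.List.mem_pyRange_one.mp hn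
    have h2n : 2 ≤ n := hmem.1
    have hns : n ≤ (Nat.sqrt top.toNat : Int) := by omega
    have hnn : n * n ≤ top := by
      set m := n.toNat with hm
      have hmn : n = (m : Int) := (Int.toNat_of_nonneg (by omega)).symm
      have hms : m ≤ Nat.sqrt top.toNat := by omega
      have h1 : m * m ≤ top.toNat := Nat.le_sqrt.mp hms
      have h2 : ((m * m : Nat) : Int) ≤ ((top.toNat : Nat) : Int) := by exact_mod_cast h1
      have h3 : ((top.toNat : Nat) : Int) = top := Int.toNat_of_nonneg (by omega)
      rw [hmn]
      push_cast at h2 ⊢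
      omega
    unfold contribA
    rw [count_pyRange_of_pos _ _ _ (by omega)]
    rw [htc]
    split_ifs with h1 h2 h2
    · exfalso; omega
    · exfalso; omega
    · exfalso; have := h2.2.1; omega
    · norm_num
  rw [List.map_congr_left this]
  simp

lemma getD_foldl_outerB (top : Int) (outer : List Int) (init : List Int) (x : Nat)
    (hlen : init.length = (top + 1).toNat)
    (h : ∀ d ∈ outer, 1 ≤ d) :
    ((outer.foldl
        (fun t d => (PySem.List.pyRange d (top + 1) d).foldl (fun t m => pyAddAtL t m 1) t)
        init).getD x 0)
      = init.getD x 0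
        + (outer.map (fun d => (((PySem.List.pyRange d (top + 1) d).count (x : Int) : Nat) : Int))).sum := by
  induction outer generalizing init with
  | nil => simp
  | cons d rest ih =>
    have hd := h d (by simp)
    have hmem : ∀ m ∈ PySem.List.pyRange d (top + 1) d, 0 ≤ m ∧ m.toNat < init.length := by
      intro m hm
      have hs := (PySem.List.mem_pyRange_iff_of_pos (by omega : (0 : Int) < d) m).mp hm
      have h1 := hs.1
      have h2 := hs.2.1
      constructor
      · omega
      · rw [hlen]; omega
    rw [List.foldl_cons,
      ih _ (by rw [length_foldl_pyAddAtL, hlen]) (fun e he => h e (List.mem_cons_of_mem _ he)),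
      getD_foldl_pyAddAtL _ _ _ _ hmem]
    simp
    ring

lemma tauBL_getD_tau (top : Int) (x : Nat) (hx : 1 ≤ x) (hxt : (x : Int) ≤ top) :
    (tauBL top).getD x 0 = (x.divisors.card : Int) := by
  have ht : 0 ≤ top := by omega
  have htoN : ((top.toNat : Nat) : Int) = top := Int.toNat_of_nonneg ht
  unfold tauBL
  rw [getD_foldl_outerB top _ _ x (by simp)
    (fun d hd => (PySem.List.mem_pyRange_one.mp hd).1)]
  have hinit : (List.replicate (top + 1).toNat (0 : Int)).getD x 0 = 0 := by
    rcases Nat.lt_or_ge x (top + 1).toNat with h | h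
    · rw [List.getD_eq_getElem?_getD, List.getElem?_eq_getElem (by simpa using h)]
      simp
    · rw [List.getD_eq_getElem?_getD, List.getElem?_eq_none (by simpa using h)]
      rfl
  rw [hinit]
  have hmap : (PySem.List.pyRange 1 (top + 1)).map
      (fun d => (((PySem.List.pyRange d (top + 1) d).count (x : Int) : Nat) : Int))
      = (PySem.List.pyRange 1 (top + 1)).map
          (fun d => if decide (d.toNat ∣ x ∧ d.toNat ≤ x) = true then (1 : Int) else 0) := by
    apply List.map_congr_left
    intro d hd
    have h1d : 1 ≤ d := (PySem.List.mem_pyRange_one.mp hd).1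
    set m := d.toNat with hm
    have hmd : d = (m : Int) := (Int.toNat_of_nonneg (by omega)).symm
    rw [count_pyRange_of_pos _ _ _ (by omega)]
    have hiff : (d ≤ (x : Int) ∧ (x : Int) < top + 1 ∧ d ∣ (x : Int) - d)
        ↔ (decide (m ∣ x ∧ m ≤ x) = true) := by
      rw [decide_eq_true_eq, hmd]
      constructor
      · rintro ⟨h1, _, h3⟩
        have hdx : ((m : Int)) ∣ (x : Int) := by
          have := dvd_add h3 (dvd_refl ((m : Int)))
          simpa using this
        exact ⟨by exact_mod_cast hdx, by exact_mod_cast h1⟩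
      · rintro ⟨hdvd, hle⟩
        refine ⟨by exact_mod_cast hle, by omega, ?_⟩
        exact dvd_sub (Int.natCast_dvd_natCast.mpr hdvd) (dvd_refl _)
    rw [if_congr hiff rfl rfl]
    split <;> simp
  rw [hmap, PySem.List.sum_map_ite_one_zero]
  have hlist : PySem.List.pyRange 1 (top + 1)
      = PySem.List.pyRange ((1 : Nat) : Int) ((top.toNat + 1 : Nat) : Int) := by
    congr 1 <;> push_cast <;> omega
  rw [hlist, countP_pyRange_one 1 (top.toNat + 1) (fun d => d ∣ x ∧ d ≤ x)]
  have hfilter : (Finset.Ico 1 (top.toNat + 1)).filter (fun d => d ∣ x ∧ d ≤ x)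
      = x.divisors := by
    ext d
    rw [Finset.mem_filter, Finset.mem_Ico, Nat.mem_divisors]
    constructor
    · rintro ⟨_, hdvd, _⟩
      exact ⟨hdvd, by omega⟩
    · rintro ⟨hdvd, hx0⟩
      have hdpos : 0 < d := Nat.pos_of_dvd_of_pos hdvd (by omega)
      have hdle : d ≤ x := Nat.le_of_dvd (by omega) hdvd
      have hxN : x ≤ top.toNat := by
        have : (x : Int) ≤ ((top.toNat : Nat) : Int) := by omega
        exact_mod_cast this
      exact ⟨⟨by omega, by omega⟩, hdvd, hdle⟩
  rw [hfilter]
  simp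

lemma euler_decomp (top : Int) (ht : 2 ≤ top) :
    Euler_179 top = Euler_179_alt top + (if Nat.Prime top.toNat then 1 else 0) := by
  have httoN : ((top.toNat : Nat) : Int) = top := Int.toNat_of_nonneg (by omega)
  have hAbody : (fun (c : Int) x =>
      if (divlistAL top).getD x.toNat 0 = (divlistAL top).getD (x + 1).toNat 0 then c + 1 else c)
      = (fun c x =>
        if (fun y : Int => decide ((divlistAL top).getD y.toNat 0
            = (divlistAL top).getD (y + 1).toNat 0)) x = true then c + 1 else c) := by
    funext c x
    simp
  have hBbody : (fun (c : Int) n =>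
      if (tauBL top).getD n.toNat 0 = (tauBL top).getD (n + 1).toNat 0 then c + 1 else c)
      = (fun c n =>
        if (fun y : Int => decide ((tauBL top).getD y.toNat 0
            = (tauBL top).getD (y + 1).toNat 0)) n = true then c + 1 else c) := by
    funext c n
    simp
  have harrA : ∀ n : Nat, (divlistA top).getD n 0 = (divlistAL top).getD n 0 := by
    intro n
    rw [arr_getD_eq, toList_divlistA]
  have harrB : ∀ n : Nat, (tauB top).getD n 0 = (tauBL top).getD n 0 := by
    intro n
    rw [arr_getD_eq, toList_tauB]
  have hA0 : Euler_179 top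
      = (PySem.List.pyRange 1 (top + 1)).foldl
          (fun c x =>
            if (divlistAL top).getD x.toNat 0 = (divlistAL top).getD (x + 1).toNat 0
            then c + 1 else c) 0 := by
    show (PySem.List.pyRange 1 (top + 1)).foldl
        (fun c x =>
          if (divlistA top).getD x.toNat 0 = (divlistA top).getD (x + 1).toNat 0
          then c + 1 else c) 0 = _
    simp only [harrA]
  have hB0 : Euler_179_alt top
      = (PySem.List.pyRange 2 top).foldl
          (fun c n =>
            if (tauBL top).getD n.toNat 0 = (tauBL top).getD (n + 1).toNat 0
            then c + 1 else c) 0 := by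
    show (PySem.List.pyRange 2 top).foldl
        (fun c n =>
          if (tauB top).getD n.toNat 0 = (tauB top).getD (n + 1).toNat 0
          then c + 1 else c) 0 = _
    simp only [harrB]
  rw [hA0, hB0, hAbody, hBbody, PySem.List.foldl_count_if, PySem.List.foldl_count_if]
  set pA : Int → Bool := fun y =>
    decide ((divlistAL top).getD y.toNat 0 = (divlistAL top).getD (y + 1).toNat 0) with hpA
  set pB : Int → Bool := fun y =>
    decide ((tauBL top).getD y.toNat 0 = (tauBL top).getD (y + 1).toNat 0) with hpB
  rw [PySem.List.pyRange_one_cons (by omega : (1 : Int) < top + 1),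
    show (1 : Int) + 1 = 2 from by norm_num,
    PySem.List.pyRange_one_succ_right (by omega : (2 : Int) ≤ top),
    List.countP_cons, List.countP_append]
  have hpA1 : pA 1 = false := by
    rw [hpA]
    simp only [decide_eq_false_iff_not]
    rw [show ((1 : Int)).toNat = 1 from rfl, show ((1 : Int) + 1).toNat = 2 from rfl,
      divlistAL_getD_one top (by omega), divlistAL_getD_tau top 2 (by omega) (by omega)]
    have h2 : (2 : Nat).divisors.card = 2 := by decide
    rw [h2]
    norm_num
  have hmid : (PySem.List.pyRange 2 top).countP pA = (PySem.List.pyRange 2 top).countP pB := by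
    apply List.countP_congr
    intro y hy
    have hmem := PySem.List.mem_pyRange_one.mp hy
    have hy1 : ((y + 1).toNat : Nat) = y.toNat + 1 := by omega
    have e1 : (divlistAL top).getD y.toNat 0 = (y.toNat.divisors.card : Int) :=
      divlistAL_getD_tau top y.toNat (by omega) (by omega)
    have e2 : (divlistAL top).getD (y + 1).toNat 0 = ((y.toNat + 1).divisors.card : Int) := by
      rw [hy1]
      exact divlistAL_getD_tau top (y.toNat + 1) (by omega) (by push_cast; omega)
    have e3 : (tauBL top).getD y.toNat 0 = (y.toNat.divisors.card : Int) :=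
      tauBL_getD_tau top y.toNat (by omega) (by omega)
    have e4 : (tauBL top).getD (y + 1).toNat 0 = ((y.toNat + 1).divisors.card : Int) := by
      rw [hy1]
      exact tauBL_getD_tau top (y.toNat + 1) (by omega) (by push_cast; omega)
    rw [hpA, hpB]
    simp only [e1, e2, e3, e4]
  have hptop : (if pA top = true then (1 : Nat) else 0)
      = (if Nat.Prime top.toNat then 1 else 0) := by
    have htop1 : ((top + 1).toNat : Nat) = top.toNat + 1 := by omega
    have hA : pA top
        = decide ((top.toNat.divisors.card : Int) = 2) := by
      rw [hpA]
      show decide ((divlistAL top).getD top.toNat 0 = (divlistAL top).getD (top + 1).toNat 0)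
        = decide ((top.toNat.divisors.card : Int) = 2)
      rw [show (divlistAL top).getD top.toNat 0 = (top.toNat.divisors.card : Int) from
          divlistAL_getD_tau top top.toNat (by omega) (by omega),
        divlistAL_getD_top_succ top (by omega)]
    rw [hA]
    by_cases hp : Nat.Prime top.toNat
    · have hc := (prime_iff_card_divisors top.toNat (by omega)).mp hp
      rw [if_pos hp, if_pos (by rw [decide_eq_true_eq]; exact_mod_cast hc)]
    · have hc : top.toNat.divisors.card ≠ 2 :=
        fun h => hp ((prime_iff_card_divisors top.toNat (by omega)).mpr h)
      rw [if_neg hp,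
        if_neg (by rw [decide_eq_true_eq]; intro h; exact hc (by exact_mod_cast h))]
  rw [hmid, hpA1]
  have hsingle : (List.countP pA [top] : Nat) = if pA top = true then 1 else 0 := by
    simp [List.countP_cons]
  rw [hsingle, hptop]
  by_cases hp : Nat.Prime top.toNat <;> simp [hp]

-- ===== VERDICT (by name: the statement is the Claim_ definition above) =====
lemma euler_small (top : Int) (h0 : 0 ≤ top) (h1 : top ≤ 1) :
    Euler_179 top = Euler_179_alt top := by
  have : top = 0 ∨ top = 1 := by omega
  rcases this with rfl | rfl <;> decide

theorem Euler_179_spec : Claim_unchanged_Euler_179 := by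
  intro top _ hpre
  unfold Spec_Euler_179
  intro hnd
  unfold Pre_Euler_179 at hpre
  rcases (by omega : top < 2 ∨ 2 ≤ top) with h | h
  · exact euler_small top hpre (by omega)
  · rw [euler_decomp top h]
    have hnp : ¬ Nat.Prime top.toNat := fun hp => hnd ⟨h, hp⟩
    rw [if_neg hnp]
    ring

theorem Euler_179_changed : Claim_changed_Euler_179 := by
  unfold Claim_changed_Euler_179; decide

theorem Euler_179_tight : Claim_exact_Euler_179 := by
  intro top _ _ hd
  obtain ⟨h2, hp⟩ := hd
  rw [euler_decomp top h2, if_pos hp]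
  omega
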